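-- pv_equiv track=rewrite | github.com/cwwang15/ReSeg-PCFG | lib_trainer/pcfg_password_parser.py | restore_upper
-- ===== SOURCE A (Python) =====
-- def restore_upper(pwd, section_list):
--     n_section_list = []
--     start_pos = 0
--     for sec, tag in section_list:
--         t = tag[0]
--         n = int(tag[1:])
--         p = pwd[start_pos:start_pos + n]
--         n_section_list.append((p, t, n))
--         start_pos += n
--     return tuple(n_section_list)
--     pass
-- ===== SOURCE B (Python) =====
-- def restore_upper(pwd, section_list):
--     parsed = [(tag[0], int(tag[1:])) for _sec, tag in section_list]
--     offsets = [0]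
--     for _t, n in parsed:
--         offsets.append(offsets[-1] + n)
--     return tuple((pwd[s:s + n], t, n) for (t, n), s in zip(parsed, offsets))
-- ===== Notes on version B (the rewrite author's own statement) =====
-- stated objective: alternative
-- what changed: B first parses all tags into (t, n) pairs, precomputes the table of cumulative start offsets, and builds the result by zipping pairs with offsets and slicing, instead of A's single loop with a running start_pos accumulator interleaved with parsing and appending.
import Mathlib
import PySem

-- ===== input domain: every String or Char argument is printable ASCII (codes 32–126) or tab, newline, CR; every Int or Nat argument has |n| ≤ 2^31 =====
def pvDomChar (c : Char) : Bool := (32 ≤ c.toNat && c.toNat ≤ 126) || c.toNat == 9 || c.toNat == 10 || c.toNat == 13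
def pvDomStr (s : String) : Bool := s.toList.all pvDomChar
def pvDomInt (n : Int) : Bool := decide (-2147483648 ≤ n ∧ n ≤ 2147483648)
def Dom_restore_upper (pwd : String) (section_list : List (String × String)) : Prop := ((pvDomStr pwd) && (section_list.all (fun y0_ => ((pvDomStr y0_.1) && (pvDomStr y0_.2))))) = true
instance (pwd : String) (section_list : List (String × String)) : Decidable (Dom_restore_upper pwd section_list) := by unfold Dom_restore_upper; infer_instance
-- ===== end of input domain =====

-- B replaces A's running start_pos accumulator with a parse pass plus a precomputed
-- cumulative-offset table (alternative decomposition, same cost).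

-- ===== PORT A =====
-- one loop step of A: state = (start_pos, n_section_list); none = the step raised
def restore_upper_go (pwd : String) (st : Option (Int × List (String × String × Int)))
    (item : String × String) : Option (Int × List (String × String × Int)) :=
  match st with
  | none => none
  | some (start_pos, acc) =>
    match PySem.Str.pyGet? item.2 0, PySem.Int.ofStr? (PySem.Str.slice item.2 (some 1) none) with
    | some t, some n =>
        some (start_pos + n,
          acc ++ [(PySem.Str.slice pwd (some start_pos) (some (start_pos + n)), String.singleton t, n)])
    | _, _ => none

def restore_upper (pwd : String) (section_list : List (String × String)) : List (String × String × Int) :=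
  match section_list.foldl (restore_upper_go pwd) (some (0, [])) with
  | some (_, acc) => acc
  | none => []

-- ===== PORT B =====
-- tag[0], int(tag[1:]); none = the parse raised
def restore_upper_parse? (tag : String) : Option (String × Int) :=
  match PySem.Str.pyGet? tag 0, PySem.Int.ofStr? (PySem.Str.slice tag (some 1) none) with
  | some t, some n => some (String.singleton t, n)
  | _, _ => none

def restore_upper_alt (pwd : String) (section_list : List (String × String)) : List (String × String × Int) :=
  match section_list.mapM (fun item => restore_upper_parse? item.2) with
  | none => []
  | some parsed =>
    let offsets := List.scanl (· + ·) 0 (parsed.map Prod.snd)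
    (parsed.zip offsets).map
      (fun pr => (PySem.Str.slice pwd (some pr.2) (some (pr.2 + pr.1.2)), pr.1.1, pr.1.2))

-- ===== PRECONDITION & SPEC =====
-- Pre_ excludes exactly the inputs where A raises: an empty tag (IndexError on tag[0])
-- or a tag whose tail is not a Python int literal (ValueError on int(tag[1:])).
def Pre_restore_upper (_pwd : String) (section_list : List (String × String)) : Prop :=
  ∀ p ∈ section_list, p.2 ≠ "" ∧ (PySem.Int.ofStr? (PySem.Str.slice p.2 (some 1) none)).isSome
instance (pwd : String) (section_list : List (String × String)) : Decidable (Pre_restore_upper pwd section_list) := by unfold Pre_restore_upper; infer_instance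

def pvWitness_restore_upper : String × (List (String × String)) :=
  ("Abc12", [("Abc", "A3"), ("12", "D2")])

def Spec_restore_upper (pwd : String) (section_list : List (String × String)) (out : List (String × String × Int)) : Prop := out = restore_upper_alt pwd section_list
instance (pwd : String) (section_list : List (String × String)) (out : List (String × String × Int)) : Decidable (Spec_restore_upper pwd section_list out) := by unfold Spec_restore_upper; infer_instance

-- ===== CLAIM (what is proved, stated in full; the proofs are below) =====
def Claim_equal_restore_upper : Prop := ∀ (pwd : String) (section_list : List (String × String)), Dom_restore_upper pwd section_list → Pre_restore_upper pwd section_list → Spec_restore_upper pwd section_list (restore_upper pwd section_list)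

-- ===== LEMMAS AND PROOFS =====

-- B's computation generalized to an arbitrary starting offset
def altFrom (pwd : String) (start : Int) (l : List (String × String)) : List (String × String × Int) :=
  match l.mapM (fun item => restore_upper_parse? item.2) with
  | none => []
  | some parsed =>
    (parsed.zip (List.scanl (· + ·) start (parsed.map Prod.snd))).map
      (fun pr => (PySem.Str.slice pwd (some pr.2) (some (pr.2 + pr.1.2)), pr.1.1, pr.1.2))

theorem alt_eq_altFrom (pwd : String) (l : List (String × String)) :
    restore_upper_alt pwd l = altFrom pwd 0 l := rfl

theorem pyGet0_eq {α : Type} (xs : List α) : PySem.List.pyGet? xs 0 = xs[0]? := by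
  cases xs <;> simp [PySem.List.pyGet?, PySem.List.pyIdx?]

theorem parse_ok {tag : String} (h1 : tag ≠ "")
    (h2 : (PySem.Int.ofStr? (PySem.Str.slice tag (some 1) none)).isSome) :
    ∃ t n, tag.toList[0]? = some t ∧
      PySem.Int.ofStr? (PySem.Str.slice tag (some 1) none) = some n := by
  rcases Option.isSome_iff_exists.mp h2 with ⟨n, hn⟩
  have hne : tag.toList ≠ [] := by intro h; exact h1 (by simp_all)
  cases htl : tag.toList with
  | nil => exact absurd htl hne
  | cons c cs => exact ⟨c, n, rfl, hn⟩

theorem altFrom_cons (pwd : String) (start : Int) (p : String × String) (rest : List (String × String))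
    {t : Char} {n : Int}
    (ht : p.2.toList[0]? = some t)
    (hn : PySem.Int.ofStr? (PySem.Str.slice p.2 (some 1) none) = some n)
    (hrest : (rest.mapM (fun item => restore_upper_parse? item.2)).isSome) :
    altFrom pwd start (p :: rest) =
      (PySem.Str.slice pwd (some start) (some (start + n)), String.singleton t, n)
        :: altFrom pwd (start + n) rest := by
  rcases Option.isSome_iff_exists.mp hrest with ⟨parsed, hp⟩
  have hps : restore_upper_parse? p.2 = some (String.singleton t, n) := by
    simp [restore_upper_parse?, pyGet0_eq, ht, hn]
  simp [altFrom, List.mapM_cons, hps, hp, List.scanl_cons]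

theorem mapM_ok (l : List (String × String))
    (h : ∀ p ∈ l, p.2 ≠ "" ∧ (PySem.Int.ofStr? (PySem.Str.slice p.2 (some 1) none)).isSome) :
    (l.mapM (fun item => restore_upper_parse? item.2)).isSome := by
  induction l with
  | nil => simp
  | cons p rest ih =>
    rcases h p (by simp) with ⟨h1, h2⟩
    rcases parse_ok h1 h2 with ⟨t, n, ht, hn⟩
    rcases Option.isSome_iff_exists.mp (ih (fun q hq => h q (List.mem_cons_of_mem p hq))) with ⟨parsed, hp⟩
    have hps : restore_upper_parse? p.2 = some (String.singleton t, n) := by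
      simp [restore_upper_parse?, pyGet0_eq, ht, hn]
    simp [List.mapM_cons, hps, hp]

theorem foldl_key (pwd : String) (l : List (String × String)) :
    ∀ (start : Int) (acc : List (String × String × Int)),
    (∀ p ∈ l, p.2 ≠ "" ∧ (PySem.Int.ofStr? (PySem.Str.slice p.2 (some 1) none)).isSome) →
    ∃ s', l.foldl (restore_upper_go pwd) (some (start, acc)) = some (s', acc ++ altFrom pwd start l) := by
  induction l with
  | nil => intro start acc _; exact ⟨start, by simp [altFrom]⟩
  | cons p rest ih =>
    intro start acc h
    rcases h p (by simp) with ⟨h1, h2⟩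
    rcases parse_ok h1 h2 with ⟨t, n, ht, hn⟩
    have hrest := fun q hq => h q (List.mem_cons_of_mem p hq)
    rcases ih (start + n) (acc ++ [(PySem.Str.slice pwd (some start) (some (start + n)), String.singleton t, n)]) hrest with ⟨s', hs'⟩
    refine ⟨s', ?_⟩
    rw [List.foldl_cons]
    have hstep : restore_upper_go pwd (some (start, acc)) p =
        some (start + n, acc ++ [(PySem.Str.slice pwd (some start) (some (start + n)), String.singleton t, n)]) := by
      simp [restore_upper_go, pyGet0_eq, ht, hn]
    rw [hstep, hs', altFrom_cons pwd start p rest ht hn (mapM_ok rest hrest)]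
    simp

-- ===== VERDICT (by name: the statement is the Claim_ definition above) =====
theorem restore_upper_spec : Claim_equal_restore_upper := by
  intro pwd l _ hpre
  show restore_upper pwd l = restore_upper_alt pwd l
  rcases foldl_key pwd l 0 [] hpre with ⟨s', hs'⟩
  rw [restore_upper, hs', alt_eq_altFrom]
  simp
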